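-- pv_equiv track=rewrite | github.com/AndreasWintherMoen/SchoolAssignments | TDT4110/Oving10/Sjakk/Chess.py | LineIsUnique
-- ===== SOURCE A (Python) =====
-- def LineIsUnique(line):
--     uniqueLine = []
--     for item in line:
--         if item not in uniqueLine or item == 0:
--             uniqueLine.append(item)
--         else:
--             return False
--     return True
-- ===== SOURCE B (Python) =====
-- def LineIsUnique(line):
--     nz = [x for x in line if x != 0]
--     return len(nz) == len(set(nz))
-- ===== Notes on version B (the rewrite author's own statement) =====
-- stated objective: idiomatic
-- what changed: Replaces the element-by-element membership loop with early return by a nonzero filter plus a single set-cardinality comparison.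
import Mathlib
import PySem

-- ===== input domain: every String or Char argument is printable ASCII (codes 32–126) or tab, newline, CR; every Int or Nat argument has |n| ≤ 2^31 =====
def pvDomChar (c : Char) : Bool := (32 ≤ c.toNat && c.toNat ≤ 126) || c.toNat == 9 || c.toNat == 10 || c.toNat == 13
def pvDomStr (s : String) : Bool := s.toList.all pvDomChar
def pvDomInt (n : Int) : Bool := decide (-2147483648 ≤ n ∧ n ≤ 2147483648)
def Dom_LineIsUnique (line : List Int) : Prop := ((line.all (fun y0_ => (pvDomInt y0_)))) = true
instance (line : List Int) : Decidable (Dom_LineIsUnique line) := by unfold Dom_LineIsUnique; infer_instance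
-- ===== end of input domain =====

-- B replaces A's membership loop with a filter of the nonzero elements and one set-cardinality comparison (idiomatic).

-- ===== PORT A =====
-- the loop over `line` with accumulator `uniqueLine`, early-returning False
def LineIsUniqueGo (xs : List Int) (uniqueLine : List Int) : Bool :=
  match xs with
  | [] => true
  | item :: rest =>
      if !uniqueLine.contains item || item == 0 then
        LineIsUniqueGo rest (uniqueLine ++ [item])
      else
        false

def LineIsUnique (line : List Int) : Bool := LineIsUniqueGo line []

-- ===== PORT B =====
def LineIsUnique_alt (line : List Int) : Bool :=
  let nz := line.filter (fun x => x != 0)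
  nz.length == (PySem.Set.ofList nz).length

-- ===== PRECONDITION & SPEC =====
def Spec_LineIsUnique (line : List Int) (out : Bool) : Prop := out = LineIsUnique_alt line
instance (line : List Int) (out : Bool) : Decidable (Spec_LineIsUnique line out) := by unfold Spec_LineIsUnique; infer_instance

-- ===== CLAIM (what is proved, stated in full; the proofs are below) =====
def Claim_equal_LineIsUnique : Prop := ∀ (line : List Int), Dom_LineIsUnique line → Spec_LineIsUnique line (LineIsUnique line)

-- ===== LEMMAS AND PROOFS =====

-- set(xs) is a sublist of xs (first occurrences, in order)
theorem ofList_sublist {α : Type} [BEq α] [LawfulBEq α] (xs : List α) :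
    (PySem.Set.ofList xs).Sublist xs := by
  induction xs using List.reverseRecOn with
  | nil => simp [PySem.Set.ofList_nil]
  | append_singleton ys y ih =>
      rw [PySem.Set.ofList_append_singleton]
      unfold PySem.Set.add
      split
      · exact ih.trans (List.sublist_append_left ys [y])
      · exact List.Sublist.append ih (List.Sublist.refl [y])

-- len(xs) == len(set(xs)) decides Nodup
theorem length_ofList_eq_iff {α : Type} [BEq α] [LawfulBEq α] (xs : List α) :
    (xs.length = (PySem.Set.ofList xs).length) ↔ xs.Nodup := by
  constructor
  · intro h
    have := (ofList_sublist xs).eq_of_length h.symm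
    rw [← this]
    exact PySem.Set.nodup_ofList xs
  · intro h
    exact (congrArg List.length (PySem.Set.ofList_eq_self_of_nodup xs h)).symm

-- characterisation of A's loop
theorem go_true_iff (xs acc : List Int) :
    LineIsUniqueGo xs acc = true ↔
      (∀ x ∈ xs, x ≠ 0 → x ∉ acc) ∧ (xs.filter (fun x => x != 0)).Nodup := by
  induction xs generalizing acc with
  | nil => simp [LineIsUniqueGo]
  | cons item rest ih =>
      rw [LineIsUniqueGo]
      by_cases h0 : item = 0
      · subst h0
        simp only [List.filter_cons, bne_self_eq_false, if_pos, BEq.rfl,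
          Bool.or_true, ih, List.mem_cons]
        constructor
        · rintro ⟨h1, h2⟩
          refine ⟨fun x hx hxn => ?_, h2⟩
          rcases hx with rfl | hx
          · exact absurd rfl hxn
          · intro hm
            exact h1 x hx hxn (by simp [hm])
        · rintro ⟨h1, h2⟩
          refine ⟨fun x hx hxn => ?_, h2⟩
          simp only [List.mem_append, List.mem_singleton]
          rintro (hm | rfl)
          · exact h1 x (Or.inr hx) hxn hm
          · exact hxn rfl
      · by_cases hmem : item ∈ acc
        · have hcond : (!acc.contains item || item == 0) = false := by
            simp [List.contains_eq_mem, hmem, h0]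
          rw [hcond]
          simp only [Bool.false_eq_true, if_false, false_iff, not_and]
          intro h1 _
          exact h1 item (by simp) h0 hmem
        · have hcond : (!acc.contains item || item == 0) = true := by
            simp [List.contains_eq_mem, hmem]
          rw [hcond, if_pos rfl, ih]
          rw [List.filter_cons_of_pos (by simp [h0])]
          simp only [List.nodup_cons, List.mem_filter, List.mem_cons]
          constructor
          · rintro ⟨h1, h2⟩
            refine ⟨fun x hx hxn => ?_, ⟨fun hc => ?_, h2⟩⟩
            · rcases hx with rfl | hx
              · exact hmem
              · intro hm
                exact (by simpa using h1 x hx hxn : x ∉ acc ∧ x ≠ item).1 hm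
            · exact (by simpa using h1 item hc.1 h0 : item ∉ acc ∧ item ≠ item).2 rfl
          · rintro ⟨h1, h2, h3⟩
            refine ⟨fun x hx hxn => ?_, h3⟩
            simp only [List.mem_append, List.mem_singleton]
            rintro (hm | rfl)
            · exact h1 x (Or.inr hx) hxn hm
            · exact h2 ⟨hx, by simp [h0]⟩

theorem eq_ports (line : List Int) : LineIsUnique line = LineIsUnique_alt line := by
  unfold LineIsUnique LineIsUnique_alt
  by_cases h : (line.filter (fun x => x != 0)).Nodup
  · have hA : LineIsUniqueGo line [] = true := (go_true_iff line []).mpr ⟨by simp, h⟩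
    have hB := (length_ofList_eq_iff (line.filter (fun x => x != 0))).mpr h
    simp [hA, hB]
  · have hA : ¬ LineIsUniqueGo line [] = true := fun hc => h ((go_true_iff line []).mp hc).2
    have hB : ¬ (line.filter (fun x => x != 0)).length =
        (PySem.Set.ofList (line.filter (fun x => x != 0))).length :=
      fun hc => h ((length_ofList_eq_iff _).mp hc)
    simp only [Bool.not_eq_true] at hA
    simp [hA, hB]

-- ===== VERDICT (by name: the statement is the Claim_ definition above) =====
theorem LineIsUnique_spec : Claim_equal_LineIsUnique := by
  intro line _
  unfold Spec_LineIsUnique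
  exact eq_ports line
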